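-- pv_equiv track=rewrite | github.com/Robinrai2612/DSA-SOLUTIONS-PYTHON- | Boundary traversal of matrix - GFG/boundary-traversal-of-matrix.py | BoundaryTraversal
-- ===== SOURCE A (Python) =====
-- def BoundaryTraversal(matrix, n, m):
--     # code here
--     result = []
--
--     # Handle the special case when the matrix has only one row
--     if n == 1:
--         result.extend(matrix[0])
--         return result
--
--     # Handle the special case when the matrix has only one column
--     if m == 1:
--         for i in range(n):
--             result.append(matrix[i][0])
--         return result
--
--     for i in range(m):
--         result.append(matrix[0][i])  # Traverse the first row
--
--     for i in range(1, n):
--         result.append(matrix[i][m - 1])  # Traverse the last column (excluding first and last elements)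
--
--     for i in range(m - 2, -1, -1):
--         result.append(matrix[n - 1][i])  # Traverse the last row (excluding first and last elements)
--
--     for i in range(n - 2, 0, -1):
--         result.append(matrix[i][0])  # Traverse the first column (excluding first and last elements)
--
--     return result
-- ===== SOURCE B (Python) =====
-- def BoundaryTraversal(matrix, n, m):
--     # Single-row / single-column degenerate cases, as in the spec.
--     if n == 1:
--         result = []
--         result.extend(matrix[0])
--         return result
--     if m == 1:
--         result = []
--         for i in range(n):
--             result.append(matrix[i][0])
--         return result
--     # General case: one stateful clockwise perimeter walk instead of four
--     # segment loops. Start at (0,0) heading right; turn clockwise whenever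
--     # the next step would leave the boundary; emit exactly 2*(n+m)-4 cells.
--     result = []
--     r, c = 0, 0
--     dr, dc = 0, 1
--     for _ in range(2 * (n + m) - 4):
--         result.append(matrix[r][c])
--         nr, nc = r + dr, c + dc
--         if not (0 <= nr <= n - 1 and 0 <= nc <= m - 1):
--             dr, dc = dc, -dr
--             nr, nc = r + dr, c + dc
--         r, c = nr, nc
--     return result
-- ===== Notes on version B (the rewrite author's own statement) =====
-- stated objective: alternative
-- what changed: replaces A's four per-segment boundary loops by a single stateful clockwise perimeter walk (position + direction, turning at the ring boundary) that emits exactly 2*(n+m)-4 cells; the single-row and single-column special cases are kept as in A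
-- outside the precondition, e.g. on BoundaryTraversal([[1, 2, 3]], 0, 3): A returns [1, 2, 3, 2, 1], B raises IndexError; on BoundaryTraversal([[1, 2], [3, 4]], 2, 0): A returns [4], B returns []
import Mathlib
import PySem

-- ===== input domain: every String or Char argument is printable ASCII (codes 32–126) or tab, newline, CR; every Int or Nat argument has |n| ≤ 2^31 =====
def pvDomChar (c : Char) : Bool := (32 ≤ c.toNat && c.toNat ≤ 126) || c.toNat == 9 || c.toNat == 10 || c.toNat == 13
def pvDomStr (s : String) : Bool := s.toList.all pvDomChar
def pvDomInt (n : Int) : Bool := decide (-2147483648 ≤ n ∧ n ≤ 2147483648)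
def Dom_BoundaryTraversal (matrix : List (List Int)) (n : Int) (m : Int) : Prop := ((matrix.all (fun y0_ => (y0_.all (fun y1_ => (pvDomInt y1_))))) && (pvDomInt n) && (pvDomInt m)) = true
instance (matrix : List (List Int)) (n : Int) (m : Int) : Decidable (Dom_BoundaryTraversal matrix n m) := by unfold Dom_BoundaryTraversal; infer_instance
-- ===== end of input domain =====

-- B replaces A's four perimeter segment loops by a single stateful clockwise
-- ring walk (position + direction, turning at the boundary); objective:
-- alternative decomposition, same cost.

-- matrix[r][c] (both reads succeed on every index either program uses on
-- inputs Pre_ admits)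
def pvCell (matrix : List (List Int)) (r c : Int) : Int :=
  PySem.List.pyGetD (PySem.List.pyGetD matrix r []) c 0

-- ===== PORT A =====
def BoundaryTraversal (matrix : List (List Int)) (n : Int) (m : Int) : List Int :=
  if n = 1 then [] ++ PySem.List.pyGetD matrix 0 []
  else if m = 1 then
    (PySem.List.pyRange 0 n).foldl (fun result i => result ++ [pvCell matrix i 0]) []
  else
    let result := (PySem.List.pyRange 0 m).foldl (fun result i => result ++ [pvCell matrix 0 i]) []
    let result := (PySem.List.pyRange 1 n).foldl (fun result i => result ++ [pvCell matrix i (m-1)]) result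
    let result := (PySem.List.pyRange (m-2) (-1) (-1)).foldl (fun result i => result ++ [pvCell matrix (n-1) i]) result
    (PySem.List.pyRange (n-2) 0 (-1)).foldl (fun result i => result ++ [pvCell matrix i 0]) result

-- ===== PORT B =====
-- one step of the walk: emit matrix[r][c], then step, turning clockwise if the
-- step would leave the ring bounds; state = (result, r, c, dr, dc)
def bStep (matrix : List (List Int)) (n m : Int)
    (st : List Int × Int × Int × Int × Int) : List Int × Int × Int × Int × Int :=
  match st with
  | (result, r, c, dr, dc) =>
    let result := result ++ [pvCell matrix r c]
    let nr := r + dr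
    let nc := c + dc
    if 0 ≤ nr ∧ nr ≤ n - 1 ∧ 0 ≤ nc ∧ nc ≤ m - 1 then (result, nr, nc, dr, dc)
    else (result, r + dc, c + (-dr), dc, -dr)

def BoundaryTraversal_alt (matrix : List (List Int)) (n : Int) (m : Int) : List Int :=
  if n = 1 then [] ++ PySem.List.pyGetD matrix 0 []
  else if m = 1 then
    (PySem.List.pyRange 0 n).foldl (fun result i => result ++ [pvCell matrix i 0]) []
  else
    ((PySem.List.pyRange 0 (2*(n+m)-4)).foldl
      (fun st _ => bStep matrix n m st) ([], 0, 0, 0, 1)).1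

-- ===== PRECONDITION & SPEC =====
-- Pre_ admits the inputs on which A returns without an exception (per branch,
-- the index reads that branch performs must be in range; for n ≤ 0 ∧ m ≤ 0
-- every loop is empty), except the mixed-sign region (n ≤ 0 with m ≥ 2, or
-- m ≤ 0 with n ≥ 2), where A's occasional return values rest on Python
-- negative-index wraparound, outside the purpose of a boundary traversal of
-- an n×m matrix.
def Pre_BoundaryTraversal (matrix : List (List Int)) (n : Int) (m : Int) : Prop :=
  (n = 1 ∧ matrix ≠ [])
  ∨ (n ≠ 1 ∧ m = 1 ∧ n ≤ (matrix.length : Int) ∧ (matrix.take n.toNat).all (fun r => !r.isEmpty))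
  ∨ (2 ≤ n ∧ 2 ≤ m ∧ n ≤ (matrix.length : Int) ∧ (matrix.take n.toNat).all (fun r => m ≤ (r.length : Int)))
  ∨ (n ≤ 0 ∧ m ≤ 0)
instance (matrix : List (List Int)) (n : Int) (m : Int) : Decidable (Pre_BoundaryTraversal matrix n m) := by unfold Pre_BoundaryTraversal; infer_instance

def pvWitness_BoundaryTraversal : List (List Int) × Int × Int := ([[1,2,3],[4,5,6],[7,8,9]], 3, 3)

def Spec_BoundaryTraversal (matrix : List (List Int)) (n : Int) (m : Int) (out : List Int) : Prop := out = BoundaryTraversal_alt matrix n m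
instance (matrix : List (List Int)) (n : Int) (m : Int) (out : List Int) : Decidable (Spec_BoundaryTraversal matrix n m out) := by unfold Spec_BoundaryTraversal; infer_instance

-- ===== CLAIM (what is proved, stated in full; the proofs are below) =====
def Claim_equal_BoundaryTraversal : Prop := ∀ (matrix : List (List Int)) (n : Int) (m : Int), Dom_BoundaryTraversal matrix n m → Pre_BoundaryTraversal matrix n m → Spec_BoundaryTraversal matrix n m (BoundaryTraversal matrix n m)

-- ===== LEMMAS AND PROOFS =====

-- a fold that ignores the list elements is an iterate
theorem foldl_ignore_eq_iterate {α β : Type} (f : β → β) (l : List α) (init : β) :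
    l.foldl (fun st _ => f st) init = f^[l.length] init := by
  induction l generalizing init with
  | nil => rfl
  | cons x t ih => simp [List.foldl_cons, ih, Function.iterate_succ_apply]

-- pyRange with step 1 / step -1 as a mapped List.range
theorem pyRange_pos_eq (a b : Int) (h : a ≤ b) :
    PySem.List.pyRange a b = (List.range (b - a).toNat).map (fun k : Nat => a + (k : Int)) := by
  unfold PySem.List.pyRange
  rcases lt_or_eq_of_le h with h' | h'
  · simp only [one_ne_zero, if_false, if_pos h', zero_lt_one, if_true, one_mul]
    congr 2
    have : b - a + 1 - 1 = b - a := by ring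
    rw [this, Int.ediv_one]
  · simp [← h']

theorem pyRange_neg_one_eq (a b : Int) (h : b ≤ a) :
    PySem.List.pyRange a b (-1) = (List.range (a - b).toNat).map (fun k : Nat => a - (k : Int)) := by
  unfold PySem.List.pyRange
  rcases lt_or_eq_of_le h with h' | h'
  · simp only [neg_neg, if_pos h', neg_mul, one_mul, if_neg (by norm_num : ¬((-1:Int) = 0)),
      if_neg (by norm_num : ¬(0 < (-1:Int)))]
    have : (a - b + 1 - 1) / 1 = a - b := by
      have : a - b + 1 - 1 = a - b := by ring
      rw [this, Int.ediv_one]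
    rw [this]
    exact List.map_congr_left (fun k _ => by ring)
  · simp [h']

theorem bStep_eval (matrix : List (List Int)) (n m : Int) (result : List Int) (r c dr dc : Int) :
    bStep matrix n m (result, r, c, dr, dc) =
      if 0 ≤ r + dr ∧ r + dr ≤ n - 1 ∧ 0 ≤ c + dc ∧ c + dc ≤ m - 1
      then (result ++ [pvCell matrix r c], r + dr, c + dc, dr, dc)
      else (result ++ [pvCell matrix r c], r + dc, c + (-dr), dc, -dr) := by
  simp only [bStep]

-- straight-run phase lemmas for the walk (2 ≤ n, 2 ≤ m throughout)
theorem walk_right (matrix : List (List Int)) (n m : Int) (hn : 2 ≤ n) (hm : 2 ≤ m)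
    (k : Nat) (c : Int) (acc : List Int) (h0 : 0 ≤ c) (h : c + k = m - 1) :
    (bStep matrix n m)^[k] (acc, 0, c, 0, 1)
      = (acc ++ (List.range k).map (fun j : Nat => pvCell matrix 0 (c + (j:Int))), 0, m - 1, 0, 1) := by
  induction k generalizing c acc with
  | zero => simp; omega
  | succ k ih =>
    push_cast at h
    rw [Function.iterate_succ_apply, bStep_eval,
      if_pos (by constructor <;> [omega; (constructor <;> [omega; (constructor <;> omega)])])]
    simp only [add_zero]
    rw [ih (c+1) _ (by omega) (by push_cast; omega)]
    have he : (List.range (k+1)).map (fun j : Nat => pvCell matrix 0 (c + (j:Int)))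
        = pvCell matrix 0 c :: (List.range k).map (fun j : Nat => pvCell matrix 0 (c + 1 + (j:Int))) := by
      rw [List.range_succ_eq_map, List.map_cons, List.map_map]
      simp only [Nat.cast_zero, add_zero]
      congr 1
      symm
      refine List.map_congr_left fun j _ => ?_
      simp only [Function.comp_apply]
      push_cast
      ring_nf
    rw [he]
    simp

theorem walk_down (matrix : List (List Int)) (n m : Int) (hn : 2 ≤ n) (hm : 2 ≤ m)
    (k : Nat) (r : Int) (acc : List Int) (h0 : 0 ≤ r) (h : r + k = n - 1) :
    (bStep matrix n m)^[k] (acc, r, m - 1, 1, 0)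
      = (acc ++ (List.range k).map (fun j : Nat => pvCell matrix (r + (j:Int)) (m - 1)), n - 1, m - 1, 1, 0) := by
  induction k generalizing r acc with
  | zero => simp; omega
  | succ k ih =>
    push_cast at h
    rw [Function.iterate_succ_apply, bStep_eval,
      if_pos (by constructor <;> [omega; (constructor <;> [omega; (constructor <;> omega)])])]
    simp only [add_zero]
    rw [ih (r+1) _ (by omega) (by push_cast; omega)]
    have he : (List.range (k+1)).map (fun j : Nat => pvCell matrix (r + (j:Int)) (m-1))
        = pvCell matrix r (m-1) :: (List.range k).map (fun j : Nat => pvCell matrix (r + 1 + (j:Int)) (m-1)) := by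
      rw [List.range_succ_eq_map, List.map_cons, List.map_map]
      simp only [Nat.cast_zero, add_zero]
      congr 1
      symm
      refine List.map_congr_left fun j _ => ?_
      simp only [Function.comp_apply]
      push_cast
      ring_nf
    rw [he]
    simp

theorem walk_left (matrix : List (List Int)) (n m : Int) (hn : 2 ≤ n) (hm : 2 ≤ m)
    (k : Nat) (c : Int) (acc : List Int) (hc : c ≤ m - 2) (h : (k : Int) = c) :
    (bStep matrix n m)^[k] (acc, n - 1, c, 0, -1)
      = (acc ++ (List.range k).map (fun j : Nat => pvCell matrix (n - 1) (c - (j:Int))), n - 1, 0, 0, -1) := by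
  induction k generalizing c acc with
  | zero => simp; omega
  | succ k ih =>
    push_cast at h
    rw [Function.iterate_succ_apply, bStep_eval,
      if_pos (by constructor <;> [omega; (constructor <;> [omega; (constructor <;> omega)])])]
    simp only [add_zero, ← sub_eq_add_neg]
    rw [ih (c-1) _ (by omega) (by push_cast; omega)]
    have he : (List.range (k+1)).map (fun j : Nat => pvCell matrix (n-1) (c - (j:Int)))
        = pvCell matrix (n-1) c :: (List.range k).map (fun j : Nat => pvCell matrix (n-1) (c - 1 - (j:Int))) := by
      rw [List.range_succ_eq_map, List.map_cons, List.map_map]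
      simp only [Nat.cast_zero, sub_zero]
      congr 1
      symm
      refine List.map_congr_left fun j _ => ?_
      simp only [Function.comp_apply]
      push_cast
      ring_nf
    rw [he]
    simp

theorem walk_up (matrix : List (List Int)) (n m : Int) (hn : 2 ≤ n) (hm : 2 ≤ m)
    (k : Nat) (r : Int) (acc : List Int) (hr : r ≤ n - 2) (h : (k : Int) ≤ r) :
    ((bStep matrix n m)^[k] (acc, r, 0, -1, 0)).1
      = acc ++ (List.range k).map (fun j : Nat => pvCell matrix (r - (j:Int)) 0) := by
  induction k generalizing r acc with
  | zero => simp
  | succ k ih =>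
    push_cast at h
    rw [Function.iterate_succ_apply, bStep_eval,
      if_pos (by constructor <;> [omega; (constructor <;> [omega; (constructor <;> omega)])])]
    simp only [add_zero, ← sub_eq_add_neg]
    rw [ih (r-1) _ (by omega) (by push_cast; omega)]
    have he : (List.range (k+1)).map (fun j : Nat => pvCell matrix (r - (j:Int)) 0)
        = pvCell matrix r 0 :: (List.range k).map (fun j : Nat => pvCell matrix (r - 1 - (j:Int)) 0) := by
      rw [List.range_succ_eq_map, List.map_cons, List.map_map]
      simp only [Nat.cast_zero, sub_zero]
      congr 1
      symm
      refine List.map_congr_left fun j _ => ?_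
      simp only [Function.comp_apply]
      push_cast
      ring_nf
    rw [he]
    simp

-- the three corner turns of the walk
theorem turn1 (matrix : List (List Int)) (n m : Int) (hm : 2 ≤ m) (acc : List Int) :
    bStep matrix n m (acc, 0, m - 1, 0, 1)
      = (acc ++ [pvCell matrix 0 (m - 1)], 1, m - 1, 1, 0) := by
  rw [bStep_eval, if_neg (by omega)]
  norm_num

theorem turn2 (matrix : List (List Int)) (n m : Int) (hn : 2 ≤ n) (acc : List Int) :
    bStep matrix n m (acc, n - 1, m - 1, 1, 0)
      = (acc ++ [pvCell matrix (n - 1) (m - 1)], n - 1, m - 2, 0, -1) := by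
  rw [bStep_eval, if_neg (by omega)]
  norm_num
  ring_nf

theorem turn3 (matrix : List (List Int)) (n m : Int) (hn : 2 ≤ n) (acc : List Int) :
    bStep matrix n m (acc, n - 1, 0, 0, -1)
      = (acc ++ [pvCell matrix (n - 1) 0], n - 2, 0, -1, 0) := by
  rw [bStep_eval, if_neg (by omega)]
  norm_num
  ring_nf

-- the walk traverses exactly A's four boundary segments
theorem general_case (matrix : List (List Int)) (n m : Int) (hn : 2 ≤ n) (hm : 2 ≤ m) :
    BoundaryTraversal matrix n m = BoundaryTraversal_alt matrix n m := by
  have hn1 : ¬ (n = 1) := by omega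
  have hm1 : ¬ (m = 1) := by omega
  unfold BoundaryTraversal BoundaryTraversal_alt
  rw [if_neg hn1, if_neg hm1, if_neg hn1, if_neg hm1]
  rw [foldl_ignore_eq_iterate]
  have hlen : (PySem.List.pyRange 0 (2*(n+m)-4)).length =
      (n-2).toNat + (1 + ((m-2).toNat + (1 + ((n-2).toNat + (1 + (m-1).toNat))))) := by
    rw [pyRange_pos_eq 0 _ (by omega)]
    simp only [List.length_map, List.length_range]
    omega
  rw [hlen]
  simp only [Function.iterate_add_apply, Function.iterate_one]
  rw [walk_right matrix n m hn hm _ 0 [] le_rfl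
    (by rw [Int.toNat_of_nonneg (by omega : (0:Int) ≤ m - 1)]; ring)]
  rw [turn1 matrix n m hm]
  rw [walk_down matrix n m hn hm _ 1 _ (by omega)
    (by rw [Int.toNat_of_nonneg (by omega : (0:Int) ≤ n - 2)]; ring)]
  rw [turn2 matrix n m hn]
  rw [walk_left matrix n m hn hm _ (m-2) _ le_rfl
    (by rw [Int.toNat_of_nonneg (by omega : (0:Int) ≤ m - 2)])]
  rw [turn3 matrix n m hn]
  rw [walk_up matrix n m hn hm _ (n-2) _ le_rfl
    (by rw [Int.toNat_of_nonneg (by omega : (0:Int) ≤ n - 2)])]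
  rw [PySem.List.foldl_append_singleton_eq_map, PySem.List.foldl_append_singleton_eq_map,
      PySem.List.foldl_append_singleton_eq_map, PySem.List.foldl_append_singleton_eq_map,
      pyRange_pos_eq 0 m (by omega), pyRange_pos_eq 1 n (by omega),
      pyRange_neg_one_eq (m-2) (-1) (by omega), pyRange_neg_one_eq (n-2) 0 (by omega)]
  simp only [List.map_map, List.nil_append, List.append_assoc]
  have e1 : (m - 0).toNat = (m-1).toNat + 1 := by omega
  have e2 : (n - 1).toNat = (n-2).toNat + 1 := by omega
  have e3 : (m - 2 - -1).toNat = (m-2).toNat + 1 := by omega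
  have e4 : (n - 2 - 0).toNat = (n-2).toNat := by omega
  rw [e1, e2, e3, e4, List.range_succ, List.range_succ, List.range_succ]
  have c1 : (0:Int) + ((m-1).toNat : Int) = m - 1 := by omega
  have c2 : (1:Int) + ((n-2).toNat : Int) = n - 1 := by omega
  have c3 : m - 2 - ((m-2).toNat : Int) = 0 := by omega
  simp only [List.map_append, List.map_cons, List.map_nil, List.append_assoc,
    Function.comp_def, c1, c2, c3]

-- empty ranges
theorem pyRange_one_nil (a b : Int) (h : b ≤ a) : PySem.List.pyRange a b = [] := by
  unfold PySem.List.pyRange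
  simp [not_lt.2 h]

theorem pyRange_neg_one_nil (a b : Int) (h : a ≤ b) : PySem.List.pyRange a b (-1) = [] := by
  unfold PySem.List.pyRange
  simp [not_lt.2 h]

-- for n ≤ 0 and m ≤ 0 every loop of A and the whole walk of B are empty
theorem empty_case (matrix : List (List Int)) (n m : Int) (hn : n ≤ 0) (hm : m ≤ 0) :
    BoundaryTraversal matrix n m = BoundaryTraversal_alt matrix n m := by
  have hn1 : ¬ (n = 1) := by omega
  have hm1 : ¬ (m = 1) := by omega
  unfold BoundaryTraversal BoundaryTraversal_alt
  rw [if_neg hn1, if_neg hm1, if_neg hn1, if_neg hm1,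
      pyRange_one_nil 0 m (by omega), pyRange_one_nil 1 n (by omega),
      pyRange_neg_one_nil (m-2) (-1) (by omega), pyRange_neg_one_nil (n-2) 0 (by omega),
      pyRange_one_nil 0 (2*(n+m)-4) (by omega)]
  rfl

-- ===== VERDICT (by name: the statement is the Claim_ definition above) =====
theorem BoundaryTraversal_spec : Claim_equal_BoundaryTraversal := by
  intro matrix n m _ hpre
  unfold Spec_BoundaryTraversal
  rcases hpre with ⟨h1, -⟩ | ⟨h1, h2, -⟩ | ⟨h1, h2, -⟩ | ⟨h1, h2⟩
  · simp [BoundaryTraversal, BoundaryTraversal_alt, h1]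
  · simp [BoundaryTraversal, BoundaryTraversal_alt, h1, h2]
  · exact general_case matrix n m h1 h2
  · exact empty_case matrix n m h1 h2
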